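-- pv_equiv track=rewrite | github.com/Nemisorg/FileFinder | FileFinder.py | spacebarPressed
-- ===== SOURCE A (Python) =====
-- def spacebarPressed(rmList, currentSelection):
--     rmLoopCounter = 0
--
--     for file, rmMark in rmList.items():
--         if rmLoopCounter == currentSelection:
--             if rmMark == "X":
--                 rmList[file] = " "
--             else:
--                 rmList[file] = "X"
--
--         rmLoopCounter = rmLoopCounter + 1
--
--     return rmList
-- ===== SOURCE B (Python) =====
-- def spacebarPressed(rmList, currentSelection):
--     keys = list(rmList)
--     if 0 <= currentSelection < len(keys):
--         key = keys[currentSelection]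
--         rmList[key] = " " if rmList[key] == "X" else "X"
--     return rmList
-- ===== Notes on version B (the rewrite author's own statement) =====
-- stated objective: simpler
-- what changed: Replaces the whole-dict loop with a running counter by a single direct indexed access: build the key list once, bounds-check the index, toggle that one entry.
import Mathlib
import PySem

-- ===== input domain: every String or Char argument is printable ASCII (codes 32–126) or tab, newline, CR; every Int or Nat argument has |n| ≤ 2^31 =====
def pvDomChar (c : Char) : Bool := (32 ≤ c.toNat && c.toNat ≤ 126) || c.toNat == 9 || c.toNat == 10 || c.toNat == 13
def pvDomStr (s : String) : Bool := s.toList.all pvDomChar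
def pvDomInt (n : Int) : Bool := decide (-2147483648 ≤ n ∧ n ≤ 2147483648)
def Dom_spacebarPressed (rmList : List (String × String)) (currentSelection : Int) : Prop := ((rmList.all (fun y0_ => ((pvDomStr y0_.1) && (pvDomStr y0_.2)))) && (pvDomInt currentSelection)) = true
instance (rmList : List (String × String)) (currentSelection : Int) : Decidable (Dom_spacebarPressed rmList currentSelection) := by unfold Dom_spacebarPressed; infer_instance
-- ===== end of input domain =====

-- B replaces A's whole-dict loop with counter by one bounds-checked indexed toggle (simpler); both Pythons mutate rmList in place, the proof is about the returned value.


-- ===== PORT A =====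
def spacebarPressed (rmList : List (String × String)) (currentSelection : Int) : List (String × String) :=
  (rmList.foldl
    (fun (st : PySem.Dict String String × Int) p =>
      ( if st.2 == currentSelection then
          (if p.2 == "X" then st.1.insert p.1 " " else st.1.insert p.1 "X")
        else st.1,
        st.2 + 1))
    (PySem.Dict.mk rmList, 0)).1.items

-- ===== PORT B =====
def spacebarPressed_alt (rmList : List (String × String)) (currentSelection : Int) : List (String × String) :=
  let d := PySem.Dict.mk rmList
  let keys := d.keys
  if 0 ≤ currentSelection ∧ currentSelection < (keys.length : Int) then
    let key := keys.getD currentSelection.toNat ""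
    (if d.getD key "" == "X" then d.insert key " " else d.insert key "X").items
  else rmList

-- ===== PRECONDITION & SPEC =====
-- Pre_ excludes association lists with duplicate keys: they encode no Python dict (a dict literal collapses them), so neither program's behaviour there is observed from Python.
def Pre_spacebarPressed (rmList : List (String × String)) (currentSelection : Int) : Prop :=
  (rmList.map Prod.fst).Nodup
instance (rmList : List (String × String)) (currentSelection : Int) : Decidable (Pre_spacebarPressed rmList currentSelection) := by unfold Pre_spacebarPressed; infer_instance
def pvWitness_spacebarPressed : (List (String × String)) × Int := ([("a.txt", "X"), ("b.txt", " ")], 1)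
def Spec_spacebarPressed (rmList : List (String × String)) (currentSelection : Int) (out : List (String × String)) : Prop := out = spacebarPressed_alt rmList currentSelection
instance (rmList : List (String × String)) (currentSelection : Int) (out : List (String × String)) : Decidable (Spec_spacebarPressed rmList currentSelection out) := by unfold Spec_spacebarPressed; infer_instance

-- ===== CLAIM (what is proved, stated in full; the proofs are below) =====
def Claim_equal_spacebarPressed : Prop := ∀ (rmList : List (String × String)) (currentSelection : Int), Dom_spacebarPressed rmList currentSelection → Pre_spacebarPressed rmList currentSelection → Spec_spacebarPressed rmList currentSelection (spacebarPressed rmList currentSelection)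

-- ===== LEMMAS AND PROOFS =====

-- Characterisation of A's loop: at most one iteration fires (counter = currentSelection), toggling the entry at index cs - c.
theorem spacebarPressed_loop (cs : Int) (l : List (String × String))
    (d : PySem.Dict String String) (c : Int) :
    (l.foldl
      (fun (st : PySem.Dict String String × Int) p =>
        ( if st.2 == cs then
            (if p.2 == "X" then st.1.insert p.1 " " else st.1.insert p.1 "X")
          else st.1,
          st.2 + 1))
      (d, c)).1 =
    if 0 ≤ cs - c ∧ cs - c < (l.length : Int) then
      (let p := l.getD (cs - c).toNat ("", "")
       if p.2 == "X" then d.insert p.1 " " else d.insert p.1 "X")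
    else d := by
  induction l generalizing d c with
  | nil =>
    simp only [List.foldl_nil, List.length_nil, Nat.cast_zero]
    rw [if_neg (by omega)]
  | cons p l ih =>
    simp only [List.foldl_cons]
    by_cases hc : c = cs
    · subst hc
      rw [ih]
      rw [if_neg (by omega : ¬ (0 ≤ c - (c + 1) ∧ c - (c + 1) < (l.length : Int)))]
      rw [if_pos (by simp only [List.length_cons]; push_cast; omega :
        (0 ≤ c - c ∧ c - c < ((p :: l).length : Int)))]
      norm_num
    · rw [if_neg (by simp [hc] : ¬ ((c == cs) = true))]
      rw [ih]
      by_cases hin : 0 ≤ cs - (c + 1) ∧ cs - (c + 1) < (l.length : Int)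
      · have hin' : 0 ≤ cs - c ∧ cs - c < ((p :: l).length : Int) := by
          simp only [List.length_cons]; push_cast; omega
        have hidx : (cs - c).toNat = (cs - (c + 1)).toNat + 1 := by omega
        rw [if_pos hin, if_pos hin', hidx]
        simp
      · have hin' : ¬ (0 ≤ cs - c ∧ cs - c < ((p :: l).length : Int)) := by
          simp only [List.length_cons] at *; push_cast at *; omega
        rw [if_neg hin, if_neg hin']

-- The first-match lookup on a Nodup-keyed raw list returns the value stored at any index.
theorem getD_mk_getElem (rmList : List (String × String)) (i : Nat) (hi : i < rmList.length)
    (hnd : (rmList.map Prod.fst).Nodup) :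
    (PySem.Dict.mk rmList).getD (rmList[i].1) "" = rmList[i].2 := by
  apply PySem.Dict.getD_of_mem_items
  · show rmList[i] ∈ rmList
    exact List.getElem_mem hi
  · exact hnd

theorem keys_mk_getD (rmList : List (String × String)) (i : Nat) (hi : i < rmList.length) :
    (PySem.Dict.mk rmList).keys.getD i "" = rmList[i].1 := by
  show (rmList.map Prod.fst).getD i "" = rmList[i].1
  rw [List.getD_eq_getElem _ _ (by simpa using hi)]
  simp

-- ===== VERDICT (by name: the statement is the Claim_ definition above) =====
theorem spacebarPressed_spec : Claim_equal_spacebarPressed := by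
  intro rmList cs _hdom hpre
  show spacebarPressed rmList cs = spacebarPressed_alt rmList cs
  unfold spacebarPressed spacebarPressed_alt
  rw [spacebarPressed_loop]
  simp only [sub_zero]
  by_cases hin : 0 ≤ cs ∧ cs < (rmList.length : Int)
  · have hi : cs.toNat < rmList.length := by omega
    have hin' : 0 ≤ cs ∧ cs < (((PySem.Dict.mk rmList).keys).length : Int) := by
      simpa [PySem.Dict.keys] using hin
    rw [if_pos hin, if_pos hin']
    have hkey := keys_mk_getD rmList cs.toNat hi
    have hval := getD_mk_getElem rmList cs.toNat hi hpre
    rw [hkey, hval]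
    rw [List.getD_eq_getElem _ _ hi]
  · have hin' : ¬ (0 ≤ cs ∧ cs < (((PySem.Dict.mk rmList).keys).length : Int)) := by
      simpa [PySem.Dict.keys] using hin
    rw [if_neg hin, if_neg hin']
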